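-- pv_equiv track=rewrite | github.com/HamJaw1432/CSCA08-A3 | club_functions.py | clubs_of_club_members
-- ===== SOURCE A (Python) =====
-- from typing import List, Tuple, Dict, TextIO
--
-- def update_dict(key: str, value: str,
--                 key_to_values: Dict[str, List[str]]) -> None:
--     """Update key_to_values with key/value. If key is in key_to_values,
--     and value is not already in the list associated with key,
--     append value to the list. Otherwise, add the pair key/[value] to
--     key_to_values.
--
--     >>> d = {'1': ['a', 'b']}
--     >>> update_dict('2', 'c', d)
--     >>> d == {'1': ['a', 'b'], '2': ['c']}
--     True
--     >>> update_dict('1', 'c', d)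
--     >>> d == {'1': ['a', 'b', 'c'], '2': ['c']}
--     True
--     >>> update_dict('1', 'c', d)
--     >>> d == {'1': ['a', 'b', 'c'], '2': ['c']}
--     True
--     """
--
--     if key not in key_to_values:
--         key_to_values[key] = []
--
--     if value not in key_to_values[key]:
--         key_to_values[key].append(value)
--
-- def sort_dict_value(dic: Dict[str, List[str]]) -> Dict[str, List[str]]:
--     """Update the dict so that the values are in alphabetical order.
--     """
--     for keys in dic:
--         dic[keys].sort()
--
-- def clubs_of_club_members(person_to_clubs: Dict[str, List[str]],
--                           person: str) -> List[str]:
--     """Return a list of clubs of the people that are in the at least one of the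
--     same club as the person using the data in person_to_clubs
--     """
--     clubs_of_club_members_list = []
--     clubs_to_persons = invert_and_sort(person_to_clubs)
--
--     if person in person_to_clubs:
--         for club in person_to_clubs[person]:
--             for people in clubs_to_persons[club]:
--                 if people != person:
--                     clubs_of_club_members_list = (clubs_of_club_members_list +
--                                                   person_to_clubs[people])
--     final = []
--     for club in clubs_of_club_members_list:
--         if person in person_to_clubs:
--             if club not in person_to_clubs[person]:
--                 final.append(club)
--         else:
--             final.append(club)
--     final.sort()
--     return final
--
-- def invert_and_sort(key_to_value: Dict[object, object]) -> Dict[object, list]: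
--     """Return key_to_value inverted so that each key is a value (for
--     non-list values) or an item from an iterable value, and each value
--     is a list of the corresponding keys from key_to_value.  The value
--     lists in the returned dict are sorted.
--
--     >>> invert_and_sort(P2C) == {
--     ...  'Comet Club': ['Michelle Tanner'],
--     ...  'Parent Council': ['Danny R Tanner', 'Jesse Katsopolis',
--     ...                     'Joey Gladstone'],
--     ...  'Rock N Rollers': ['Jesse Katsopolis', 'Kimmy Gibbler'],
--     ...  'Comics R Us': ['Joey Gladstone'],
--     ...  'Smash Club': ['Kimmy Gibbler']}
--     True
--
--     """
--     new_dict = {}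
--     for key in key_to_value:
--         for value in key_to_value[key]:
--             if type(key_to_value[key]) != list:
--                 update_dict(key_to_value[key], key, new_dict)
--             else:
--                 update_dict(value, key, new_dict)
--
--     sort_dict_value(new_dict)
--
--     return new_dict
-- ===== SOURCE B (Python) =====
-- def clubs_of_club_members(person_to_clubs, person):
--     """Return the sorted list of clubs (with multiplicity) of the other people
--     sharing at least one club with person, excluding person's own clubs.
--     Direct scan over the dict; no inverted index is built."""
--     if person not in person_to_clubs:
--         return []
--     pclubs = person_to_clubs[person]
--     result = []
--     for people, clubs in person_to_clubs.items():
--         if people == person: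
--             continue
--         for club in pclubs:
--             if club in clubs:
--                 result.extend(clubs)
--     final = [club for club in result if club not in pclubs]
--     final.sort()
--     return final
-- ===== Notes on version B (the rewrite author's own statement) =====
-- stated objective: simpler
-- what changed: B drops A's inverted-index construction (invert_and_sort + update_dict + per-club sorted member lists) and scans the dict directly, extending one result list in place instead of A's quadratic 'result = result + other_clubs' re-concatenation, then filters and sorts.
import Mathlib
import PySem

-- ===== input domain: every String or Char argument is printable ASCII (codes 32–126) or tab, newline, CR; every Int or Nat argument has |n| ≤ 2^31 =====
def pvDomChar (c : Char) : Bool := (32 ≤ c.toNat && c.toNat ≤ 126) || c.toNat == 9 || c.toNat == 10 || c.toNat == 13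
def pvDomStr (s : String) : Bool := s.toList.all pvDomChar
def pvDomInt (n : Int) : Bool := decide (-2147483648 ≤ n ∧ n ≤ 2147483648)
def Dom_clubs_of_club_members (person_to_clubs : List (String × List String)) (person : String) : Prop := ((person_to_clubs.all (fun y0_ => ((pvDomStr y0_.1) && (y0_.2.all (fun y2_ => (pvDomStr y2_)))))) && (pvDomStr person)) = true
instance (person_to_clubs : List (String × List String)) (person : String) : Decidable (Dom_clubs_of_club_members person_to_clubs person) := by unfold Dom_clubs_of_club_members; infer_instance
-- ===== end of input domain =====

-- B replaces A's inverted-index construction (invert_and_sort + update_dict) with a direct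
-- scan over the dict producing the same sorted list; objective: simpler.

-- ===== PORT A =====
-- update_dict(key, value, d): literal port (insert with overwrite = the in-place list append).
def pv_update_dict (key : String) (value : String)
    (d : PySem.Dict String (List String)) : PySem.Dict String (List String) :=
  let d1 := if d.contains key then d else d.insert key []
  if (d1.getD key []).contains value then d1
  else d1.insert key (d1.getD key [] ++ [value])

-- invert_and_sort: iterate the dict's keys (= the pairs; keys are unique under Pre_,
-- so key_to_value[key] is the pair's value); the `type(key_to_value[key]) != list`
-- branch is statically dead here (every value is a list).
-- sort_dict_value mutates each value list in place = map sorted over the items.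
def pv_invert_and_sort (key_to_value : List (String × List String)) :
    PySem.Dict String (List String) :=
  let nd := key_to_value.foldl
    (fun acc kv => kv.2.foldl (fun a v => pv_update_dict v kv.1 a) acc)
    PySem.Dict.empty
  PySem.Dict.mk (nd.items.map (fun kv => (kv.1, PySem.List.sorted kv.2 (fun x => x) false)))

-- person_to_clubs[people] inside the loop can never raise (people comes from the
-- inverted index, so it is a key); getD [] is exact there.
def clubs_of_club_members (person_to_clubs : List (String × List String)) (person : String) : List String :=
  let D := PySem.Dict.mk person_to_clubs
  let inv := pv_invert_and_sort person_to_clubs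
  let base : List String :=
    if D.contains person then
      (D.getD person []).foldl (fun acc club =>
        (inv.getD club []).foldl (fun a people =>
          if people ≠ person then a ++ D.getD people [] else a) acc) []
    else []
  let final := base.foldl (fun acc club =>
    if D.contains person then
      (if (D.getD person []).contains club then acc else acc ++ [club])
    else acc ++ [club]) []
  PySem.List.sorted final (fun x => x) false

-- ===== PORT B =====
def clubs_of_club_members_alt (person_to_clubs : List (String × List String)) (person : String) : List String :=
  let D := PySem.Dict.mk person_to_clubs
  if D.contains person = false then []
  else
    let pclubs := D.getD person []
    let result := person_to_clubs.foldl (fun acc p =>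
      if p.1 == person then acc
      else pclubs.foldl (fun a club => if p.2.contains club then a ++ p.2 else a) acc) []
    let final := result.filter (fun club => !pclubs.contains club)
    PySem.List.sorted final (fun x => x) false

-- ===== PRECONDITION & SPEC =====
-- Pre_ excludes association lists with duplicate keys, which do not represent any
-- Python dict (a dict cannot hold two equal keys); every Python input is admitted.
def Pre_clubs_of_club_members (person_to_clubs : List (String × List String)) (person : String) : Prop :=
  (person_to_clubs.map Prod.fst).Nodup
instance (person_to_clubs : List (String × List String)) (person : String) : Decidable (Pre_clubs_of_club_members person_to_clubs person) := by unfold Pre_clubs_of_club_members; infer_instance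

def pvWitness_clubs_of_club_members : (List (String × List String)) × String :=
  ([("ann", ["x", "y"]), ("bob", ["y", "z"]), ("cid", ["w"])], "ann")

def Spec_clubs_of_club_members (person_to_clubs : List (String × List String)) (person : String) (out : List String) : Prop := out = clubs_of_club_members_alt person_to_clubs person
instance (person_to_clubs : List (String × List String)) (person : String) (out : List String) : Decidable (Spec_clubs_of_club_members person_to_clubs person out) := by unfold Spec_clubs_of_club_members; infer_instance

-- ===== CLAIM (what is proved, stated in full; the proofs are below) =====
def Claim_equal_clubs_of_club_members : Prop := ∀ (person_to_clubs : List (String × List String)) (person : String), Dom_clubs_of_club_members person_to_clubs person → Pre_clubs_of_club_members person_to_clubs person → Spec_clubs_of_club_members person_to_clubs person (clubs_of_club_members person_to_clubs person)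

-- ===== LEMMAS AND PROOFS =====

-- What one update_dict call does to every value list of the dict.
theorem pv_update_dict_getD (key value : String) (d : PySem.Dict String (List String)) (c : String) :
    (pv_update_dict key value d).getD c []
      = if c = key then
          (if value ∈ d.getD key [] then d.getD key [] else d.getD key [] ++ [value])
        else d.getD c [] := by
  unfold pv_update_dict
  by_cases hc : d.contains key
  · simp only [hc, if_true]
    by_cases hv : value ∈ d.getD key []
    · simp [hv]
      intro h1; simp [h1]
    · simp [hv, PySem.Dict.getD_insert]
  · have h0 : d.getD key [] = [] := PySem.Dict.getD_of_not_contains d [] (by simpa using hc)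
    simp [hc, h0, PySem.Dict.getD_insert, PySem.Dict.insert_insert_self]

-- Membership in the value lists after the inner update_dict loop over one value list.
theorem pv_inner_mem (vs : List String) (k : String) (acc : PySem.Dict String (List String)) (c q : String) :
    q ∈ (vs.foldl (fun a v => pv_update_dict v k a) acc).getD c []
      ↔ q ∈ acc.getD c [] ∨ (c ∈ vs ∧ q = k) := by
  induction vs generalizing acc with
  | nil => simp
  | cons v t ih =>
    simp only [List.foldl_cons, ih, pv_update_dict_getD, List.mem_cons]
    by_cases hcv : c = v
    · subst hcv
      by_cases hk : k ∈ acc.getD c []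
      · simp only [hk, if_true, true_or, true_and]
        constructor
        · rintro (h | ⟨_, rfl⟩)
          · exact Or.inl h
          · exact Or.inl hk
        · rintro (h | rfl)
          · exact Or.inl h
          · exact Or.inl hk
      · simp only [hk, if_false, true_or, true_and, if_true,
          List.mem_append, List.mem_singleton]
        tauto
    · simp [hcv]

-- The inner loop keeps every value list duplicate-free.
theorem pv_inner_nodup (vs : List String) (k : String) (acc : PySem.Dict String (List String))
    (h : ∀ c, (acc.getD c []).Nodup) (c : String) :
    ((vs.foldl (fun a v => pv_update_dict v k a) acc).getD c []).Nodup := by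
  induction vs generalizing acc with
  | nil => exact h c
  | cons v t ih =>
    refine ih _ (fun c' => ?_)
    rw [pv_update_dict_getD]
    split_ifs with h1 h2
    · exact h v
    · rw [List.nodup_append]
      refine ⟨h v, by simp, ?_⟩
      intro a ha; simp; rintro rfl; exact h2 ha
    · exact h c'

-- Membership in the value lists of the whole inversion fold.
theorem pv_fold_mem (l : List (String × List String)) (acc : PySem.Dict String (List String))
    (c q : String) :
    q ∈ (l.foldl (fun acc kv => kv.2.foldl (fun a v => pv_update_dict v kv.1 a) acc) acc).getD c []
      ↔ q ∈ acc.getD c [] ∨ ∃ p ∈ l, p.1 = q ∧ c ∈ p.2 := by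
  induction l generalizing acc with
  | nil => simp
  | cons kv t ih =>
    simp only [List.foldl_cons, ih, pv_inner_mem, List.mem_cons]
    constructor
    · rintro ((h | ⟨h1, rfl⟩) | ⟨p, hp, rfl, hc⟩)
      · tauto
      · exact Or.inr ⟨kv, Or.inl rfl, rfl, h1⟩
      · exact Or.inr ⟨p, Or.inr hp, rfl, hc⟩
    · rintro (h | ⟨p, (rfl | hp), rfl, hc⟩)
      · tauto
      · tauto
      · exact Or.inr ⟨p, hp, rfl, hc⟩

theorem pv_fold_nodup (l : List (String × List String)) (acc : PySem.Dict String (List String))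
    (h : ∀ c, (acc.getD c []).Nodup) (c : String) :
    ((l.foldl (fun acc kv => kv.2.foldl (fun a v => pv_update_dict v kv.1 a) acc) acc).getD c []).Nodup := by
  induction l generalizing acc with
  | nil => exact h c
  | cons kv t ih => exact ih _ (fun c' => pv_inner_nodup _ _ _ h c')

-- Lookup in a dict whose values were rewritten in place (sort_dict_value).
theorem pv_get?_mk_map_snd (f : List String → List String) (l : List (String × List String)) (c : String) :
    (PySem.Dict.mk (l.map (fun kv => (kv.1, f kv.2)))).get? c
      = ((PySem.Dict.mk l).get? c).map f := by
  induction l with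
  | nil => simp [PySem.Dict.get?]
  | cons kv t ih =>
    obtain ⟨k, v⟩ := kv
    simp only [List.map_cons, PySem.Dict.get?_mk_cons, ih]
    split <;> rfl

-- The inverted index: q appears under club c iff some pair (q, vs) of the input has c ∈ vs.
theorem pv_inv_getD_mem (d : List (String × List String)) (c q : String) :
    q ∈ (pv_invert_and_sort d).getD c [] ↔ ∃ p ∈ d, p.1 = q ∧ c ∈ p.2 := by
  simp only [pv_invert_and_sort]
  rw [PySem.Dict.getD_eq_get?_getD, pv_get?_mk_map_snd (fun l => PySem.List.sorted l (fun x => x) false)]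
  have h := pv_fold_mem d PySem.Dict.empty c q
  rw [PySem.Dict.getD_eq_get?_getD] at h
  cases hg : (d.foldl (fun acc kv => kv.2.foldl (fun a v => pv_update_dict v kv.1 a) acc) PySem.Dict.empty).get? c with
  | none => simp only [hg, Option.map_none, Option.getD_none] at h ⊢; simpa using h
  | some vs =>
    simp only [hg, Option.map_some, Option.getD_some] at h ⊢
    rw [PySem.List.mem_sorted]
    simpa [PySem.Dict.getD_empty] using h

-- Each member list of the inverted index is duplicate-free.
theorem pv_inv_getD_nodup (d : List (String × List String)) (c : String) :
    ((pv_invert_and_sort d).getD c []).Nodup := by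
  simp only [pv_invert_and_sort]
  rw [PySem.Dict.getD_eq_get?_getD, pv_get?_mk_map_snd (fun l => PySem.List.sorted l (fun x => x) false)]
  have h := pv_fold_nodup d PySem.Dict.empty (fun c' => by simp [PySem.Dict.getD_empty]) c
  rw [PySem.Dict.getD_eq_get?_getD] at h
  cases hg : (d.foldl (fun acc kv => kv.2.foldl (fun a v => pv_update_dict v kv.1 a) acc) PySem.Dict.empty).get? c with
  | none => simp
  | some vs =>
    simp only [hg, Option.map_some, Option.getD_some] at h ⊢
    exact ((PySem.List.sorted_perm vs (fun x => x) false).nodup_iff).2 h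

-- A fold that appends f b at each step is an append of a flatMap.
theorem pv_foldl_step_flat {α β : Type} (step : List α → β → List α) (f : β → List α)
    (h : ∀ acc b, step acc b = acc ++ f b) (l : List β) (acc : List α) :
    l.foldl step acc = acc ++ l.flatMap f := by
  induction l generalizing acc with
  | nil => simp
  | cons b t ih => simp [h, ih, List.append_assoc]

-- Swap a double sum over two lists.
theorem pv_sum_swap {α β : Type} (l1 : List α) (l2 : List β) (F : α → β → ℕ) :
    (l1.map (fun a => (l2.map (F a)).sum)).sum
      = (l2.map (fun b => (l1.map (fun a => F a b)).sum)).sum := by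
  induction l1 with
  | nil => simp
  | cons a t ih =>
    simp only [List.map_cons, List.sum_cons, ih]
    rw [← List.sum_map_add]

-- A sum over a filtered list as a sum of if-terms over the whole list.
theorem pv_sum_filter {α : Type} (l : List α) (P : α → Prop) [DecidablePred P] (h : α → ℕ) :
    ((l.filter (fun p => decide (P p))).map h).sum
      = (l.map (fun p => if P p then h p else 0)).sum := by
  induction l with
  | nil => simp
  | cons a t ih =>
    by_cases hp : P a <;> simp [hp, ih]

-- Summing h over the (duplicate-free) member list of club c in the inverted index
-- equals summing h p.1 over the pairs of the input whose value list contains c.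
theorem pv_sum_over_inv (d : List (String × List String)) (hnd : (d.map Prod.fst).Nodup)
    (c : String) (h : String → ℕ) :
    (((pv_invert_and_sort d).getD c []).map h).sum
      = (d.map (fun p => if c ∈ p.2 then h p.1 else 0)).sum := by
  have hperm : ((pv_invert_and_sort d).getD c []).Perm
      ((d.filter (fun p => decide (c ∈ p.2))).map Prod.fst) := by
    rw [List.perm_ext_iff_of_nodup (pv_inv_getD_nodup d c)
      (((List.filter_sublist (l := d)).map Prod.fst).nodup hnd)]
    intro q
    rw [pv_inv_getD_mem]
    simp only [List.mem_map, List.mem_filter, decide_eq_true_eq]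
    constructor
    · rintro ⟨p, hp, rfl, hcp⟩; exact ⟨p, ⟨hp, hcp⟩, rfl⟩
    · rintro ⟨p, ⟨hp, hcp⟩, rfl⟩; exact ⟨p, hp, rfl, hcp⟩
  rw [(hperm.map h).sum_eq]
  rw [List.map_map]
  exact pv_sum_filter d (fun p => c ∈ p.2) (fun p => h p.1)

-- The heart of the claim: both programs return the same list.
theorem pv_main (d : List (String × List String)) (person : String)
    (hnd : (d.map Prod.fst).Nodup) :
    clubs_of_club_members d person = clubs_of_club_members_alt d person := by
  simp only [clubs_of_club_members, clubs_of_club_members_alt]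
  by_cases hc : (PySem.Dict.mk d).contains person
  · simp only [hc, Bool.true_eq_false, if_true, if_false]
    set D := PySem.Dict.mk d with hD
    set pclubs := D.getD person [] with hpc
    set S := fun club => (pv_invert_and_sort d).getD club [] with hS
    -- A's base list as a flatMap
    have hAinner : ∀ (club : String) (acc : List String),
        (S club).foldl (fun a people => if people ≠ person then a ++ D.getD people [] else a) acc
          = acc ++ (S club).flatMap (fun q => if q ≠ person then D.getD q [] else []) := by
      intro club acc
      refine pv_foldl_step_flat _ _ (fun a q => ?_) _ _
      split_ifs <;> simp
    have hA : pclubs.foldl (fun acc club =>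
        (S club).foldl (fun a people => if people ≠ person then a ++ D.getD people [] else a) acc) []
        = pclubs.flatMap (fun club => (S club).flatMap (fun q => if q ≠ person then D.getD q [] else [])) := by
      refine pv_foldl_step_flat _ _ (fun acc club => hAinner club acc) _ _
    -- B's result list as a flatMap
    have hBinner : ∀ (p : String × List String) (acc : List String),
        pclubs.foldl (fun a club => if p.2.contains club then a ++ p.2 else a) acc
          = acc ++ pclubs.flatMap (fun c => if p.2.contains c then p.2 else []) := by
      intro p acc
      refine pv_foldl_step_flat _ _ (fun a c => ?_) _ _
      split_ifs <;> simp
    have hB : d.foldl (fun acc p =>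
        if p.1 == person then acc
        else pclubs.foldl (fun a club => if p.2.contains club then a ++ p.2 else a) acc) []
        = d.flatMap (fun p => if p.1 == person then []
            else pclubs.flatMap (fun c => if p.2.contains c then p.2 else [])) := by
      refine pv_foldl_step_flat _ _ (fun acc p => ?_) _ _
      by_cases hp : p.1 == person
      · simp [hp]
      · simp only [hp, if_false, Bool.false_eq_true]
        exact hBinner p acc
    rw [hA, hB]
    -- A's final loop is a filter
    have hfilt : ∀ (base : List String), base.foldl (fun acc club =>
        if pclubs.contains club then acc else acc ++ [club]) []
        = base.filter (fun club => !pclubs.contains club) := by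
      intro base
      have := PySem.List.foldl_append_if (fun club => !pclubs.contains club) (fun x => x) base []
      have h2 : List.foldl (fun acc x => if (!pclubs.contains x) = true then acc ++ [x] else acc) [] base
          = List.filter (fun club => !pclubs.contains club) base := by simpa using this
      rw [← h2]
      apply List.foldl_ext
      intro a x _
      by_cases hm : pclubs.contains x <;> simp [hm]
    rw [hfilt]
    -- both sides: sorted of a filter of permutation-equal lists
    apply PySem.List.sorted_eq_sorted_of_perm _ _ _ (fun a b h => h)
    apply List.Perm.filter
    -- the permutation, by counting every string
    rw [List.perm_iff_count]
    intro x
    rw [List.count_flatMap, List.count_flatMap]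
    have hcount : ∀ c : String,
        (List.count x ∘ fun club => (S club).flatMap fun q => if q ≠ person then D.getD q [] else []) c
          = (d.map (fun p => if c ∈ p.2 then (fun q => List.count x (if q ≠ person then D.getD q [] else [])) p.1 else 0)).sum := by
      intro c
      simp only [Function.comp_apply, List.count_flatMap, hS]
      rw [← pv_sum_over_inv d hnd c (fun q => List.count x (if q ≠ person then D.getD q [] else []))]
      rfl
    rw [List.map_congr_left (fun c _ => hcount c)]
    rw [pv_sum_swap]
    apply congrArg
    apply List.map_congr_left
    intro p hp
    by_cases hpp : p.1 == person
    · have : p.1 = person := by simpa using hpp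
      simp [Function.comp_apply, hpp, this]
    · have hne : p.1 ≠ person := by simpa using hpp
      have hgd : D.getD p.1 [] = p.2 := by
        apply PySem.Dict.getD_of_mem_items (d := D) (k := p.1) (v := p.2)
        · exact hp
        · rw [hD, PySem.Dict.keys_mk]; exact hnd
      simp only [Function.comp_apply, hpp, if_false, Bool.false_eq_true, List.count_flatMap]
      apply congrArg
      apply List.map_congr_left
      intro c _
      by_cases hm : c ∈ p.2 <;> simp [hm, hne, hgd]
  · simp only [hc, if_false, Bool.false_eq_true, if_pos (by simpa using hc)]
    simp [PySem.List.sorted_eq_nil_iff]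

-- ===== VERDICT (by name: the statement is the Claim_ definition above) =====
theorem clubs_of_club_members_spec : Claim_equal_clubs_of_club_members := by
  intro person_to_clubs person _hdom hnd
  unfold Spec_clubs_of_club_members
  exact pv_main person_to_clubs person hnd
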